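-- pv_equiv track=rewrite | github.com/geblanco/squad-experiments | scripts/plot_results.py | sort_index
-- ===== SOURCE A (Python) =====
-- from collections import defaultdict
--
-- def sort_index(index):
--   ret_index = []
--   # Sort like: Newsqa, N + S..., Squad, S + T ...
--   # group by initial letter
--   groups = defaultdict(list)
--   for i in index:
--     groups[i[0]].append(i)
--   # reorder groups
--   for group in groups.values():
--     tokens = [t.split(' ') for t in group]
--     tokens.sort(reverse=True)
--     ret_index.extend([' '.join(t) for t in tokens])
--   return ret_index
-- ===== SOURCE B (Python) =====
-- def sort_index(index):
--   # First-appearance order of group leaders, then two global stable sorts: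
--   # descending by token list, then stable regroup by first-appearance index.
--   first_seen = {}
--   for s in index:
--     first_seen.setdefault(s[0], len(first_seen))
--   ret = sorted(index, key=lambda s: s.split(' '), reverse=True)
--   ret = sorted(ret, key=lambda s: first_seen[s[0]])
--   return ret
-- ===== Notes on version B (the rewrite author's own statement) =====
-- stated objective: alternative
-- what changed: Replaces the defaultdict-bucket-then-per-group-sort with a first-appearance index table plus two global stable sorts (descending by token list, then a stable regroup by first-appearance index), returning the original strings without re-joining.
import Mathlib
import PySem

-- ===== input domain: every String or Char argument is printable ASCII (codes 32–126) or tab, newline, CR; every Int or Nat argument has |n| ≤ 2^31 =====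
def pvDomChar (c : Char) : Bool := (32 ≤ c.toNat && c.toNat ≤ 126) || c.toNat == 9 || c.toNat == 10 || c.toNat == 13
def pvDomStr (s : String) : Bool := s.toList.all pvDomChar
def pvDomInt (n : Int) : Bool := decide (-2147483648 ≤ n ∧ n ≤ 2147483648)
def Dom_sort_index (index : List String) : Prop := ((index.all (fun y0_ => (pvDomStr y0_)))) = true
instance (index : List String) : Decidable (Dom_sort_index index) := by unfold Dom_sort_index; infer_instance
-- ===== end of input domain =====

-- B groups by a first-appearance index table and two global stable sorts instead of
-- defaultdict buckets each sorted locally; same cost, different decomposition.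

-- ===== PORT A =====
-- i[0] is PySem.Str.pyGet? i 0 (none = IndexError on ""; Pre_ excludes that);
-- groups[i[0]].append(i) on the defaultdict is Dict.modify with default [];
-- t.split(' ') is PySem.Str.split? t " " (some, since the separator is nonempty).
def sort_index (index : List String) : List String :=
  let groups : PySem.Dict (Option Char) (List String) :=
    index.foldl (fun d i => d.modify (PySem.Str.pyGet? i 0) [] (· ++ [i])) PySem.Dict.empty
  (PySem.Dict.values groups).foldl (fun ret_index group =>
    let tokens := group.map (fun t => (PySem.Str.split? t " ").getD [])
    let tokens := PySem.List.sorted tokens (fun x => x) true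
    ret_index ++ tokens.map (fun t => PySem.Str.join " " t)) []

-- ===== PORT B =====
def sort_index_alt (index : List String) : List String :=
  let firstSeen : PySem.Dict (Option Char) Int :=
    index.foldl (fun d s => d.setdefault (PySem.Str.pyGet? s 0) ((PySem.Dict.size d : Int))) PySem.Dict.empty
  let ret := PySem.List.sorted index (fun s => (PySem.Str.split? s " ").getD []) true
  PySem.List.sorted ret (fun s => firstSeen.getD (PySem.Str.pyGet? s 0) 0) false

-- ===== PRECONDITION & SPEC =====
-- Pre_ excludes lists containing the empty string, on which A (and B) raise IndexError at i[0].
def Pre_sort_index (index : List String) : Prop := ∀ s ∈ index, s ≠ ""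
instance (index : List String) : Decidable (Pre_sort_index index) := by unfold Pre_sort_index; infer_instance
def pvWitness_sort_index : List String := ["Newsqa x", "N b c", "Squad", "S T", "N b c"]
def Spec_sort_index (index : List String) (out : List String) : Prop := out = sort_index_alt index
instance (index : List String) (out : List String) : Decidable (Spec_sort_index index out) := by unfold Spec_sort_index; infer_instance

-- ===== CLAIM (what is proved, stated in full; the proofs are below) =====
def Claim_equal_sort_index : Prop := ∀ (index : List String), Dom_sort_index index → Pre_sort_index index → Spec_sort_index index (sort_index index)

-- ===== LEMMAS AND PROOFS =====

-- insertBy toolkit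
theorem pv_insertBy_all_before {α : Type} (before : α → α → Bool) (x : α) (L : List α)
    (h : ∀ z ∈ L, before x z = true) : PySem.List.insertBy before x L = x :: L := by
  cases L with
  | nil => rfl
  | cons y ys => simp [PySem.List.insertBy, h y (by simp)]

theorem pv_insertBy_sandwich {α : Type} (before : α → α → Bool) (x : α) (L1 L2 : List α)
    (h1 : ∀ y ∈ L1, before x y = false) (h2 : ∀ y ∈ L2, before x y = true) :
    PySem.List.insertBy before x (L1 ++ L2) = L1 ++ x :: L2 := by
  induction L1 with
  | nil => exact pv_insertBy_all_before before x L2 h2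
  | cons y ys ih =>
    simp only [List.cons_append, PySem.List.insertBy, h1 y (by simp)]
    simp only [Bool.false_eq_true, if_false, List.cons.injEq, true_and]
    exact ih (fun z hz => h1 z (by simp [hz]))

theorem pv_insertBy_map {α β : Type} (f : α → β) (before : β → β → Bool) (x : α) (L : List α) :
    (PySem.List.insertBy (fun a b => before (f a) (f b)) x L).map f
      = PySem.List.insertBy before (f x) (L.map f) := by
  induction L with
  | nil => rfl
  | cons y ys ih =>
    simp only [List.map_cons, PySem.List.insertBy]
    split
    · simp
    · simp [ih]

theorem pv_sorted_snoc {α κ : Type} [LT κ] [DecidableLT κ] (xs : List α) (x : α) (key : α → κ) (rev : Bool) :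
    PySem.List.sorted (xs ++ [x]) key rev
      = PySem.List.insertBy (if rev then fun a b => decide (key b < key a) else fun a b => decide (key a < key b)) x
          (PySem.List.sorted xs key rev) := by
  cases rev <;> simp [PySem.List.sorted, List.foldl_append]

theorem pv_sorted_map {α β κ : Type} [LT κ] [DecidableLT κ] (f : α → β) (xs : List α) (key : β → κ) (rev : Bool) :
    PySem.List.sorted (xs.map f) key rev = (PySem.List.sorted xs (fun a => key (f a)) rev).map f := by
  induction xs using List.reverseRecOn with
  | nil => rfl
  | append_singleton R' x ih =>
    rw [List.map_append, List.map_singleton, pv_sorted_snoc, pv_sorted_snoc, ih]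
    cases rev
    · exact (pv_insertBy_map f _ x _).symm
    · exact (pv_insertBy_map f _ x _).symm

theorem pv_filter_insertBy_rev {α κ : Type} [LinearOrder κ] (key : α → κ) (p : α → Bool) (x : α) (L : List α)
    (hL : L.Pairwise (fun a b => key b ≤ key a)) :
    (PySem.List.insertBy (fun a b => decide (key b < key a)) x L).filter p
      = if p x then PySem.List.insertBy (fun a b => decide (key b < key a)) x (L.filter p) else L.filter p := by
  induction L with
  | nil => cases hpx : p x <;> simp [PySem.List.insertBy, hpx]
  | cons y ys ih =>
    rcases List.pairwise_cons.mp hL with ⟨hy, hys⟩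
    by_cases hlt : key y < key x
    · -- x goes to the head
      have h1 : PySem.List.insertBy (fun a b => decide (key b < key a)) x (y :: ys) = x :: y :: ys := by
        simp [PySem.List.insertBy, hlt]
      rw [h1]
      cases hpx : p x
      · simp [List.filter, hpx]
      · have : ∀ z ∈ (y :: ys).filter p, (fun a b => decide (key b < key a)) x z = true := by
          intro z hz
          have hzm := List.mem_of_mem_filter hz
          simp only [decide_eq_true_eq]
          rcases List.mem_cons.mp hzm with rfl | hz'
          · exact hlt
          · exact lt_of_le_of_lt (hy z hz') hlt
        rw [pv_insertBy_all_before _ _ _ this]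
        simp [List.filter, hpx]
    · have h1 : PySem.List.insertBy (fun a b => decide (key b < key a)) x (y :: ys)
          = y :: PySem.List.insertBy (fun a b => decide (key b < key a)) x ys := by
        simp [PySem.List.insertBy, hlt]
      rw [h1]
      cases hpy : p y
      · simpa [List.filter, hpy] using ih hys
      · cases hpx : p x
        · simp only [List.filter_cons, hpy]
          simp only [ih hys, hpx]
          simp
        · simp only [List.filter_cons, hpy]
          simp only [ih hys, hpx]
          have h2 : PySem.List.insertBy (fun a b => decide (key b < key a)) x (y :: ys.filter p)
              = y :: PySem.List.insertBy (fun a b => decide (key b < key a)) x (ys.filter p) := by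
            simp [PySem.List.insertBy, hlt]
          simp [h2]

theorem pv_filter_sorted_rev {α κ : Type} [LinearOrder κ] (key : α → κ) (p : α → Bool) (xs : List α) :
    (PySem.List.sorted xs key true).filter p = PySem.List.sorted (xs.filter p) key true := by
  induction xs using List.reverseRecOn with
  | nil => rfl
  | append_singleton R' x ih =>
    rw [pv_sorted_snoc, if_pos rfl]
    rw [pv_filter_insertBy_rev key p x _ (PySem.List.sorted_pairwise_rev R' key)]
    rw [List.filter_append]
    cases hpx : p x
    · simp only [hpx, Bool.false_eq_true, if_false, List.filter_cons, List.filter_nil,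
        List.append_nil, ih]
    · simp only [List.filter_cons, hpx, if_true, List.filter_nil]
      rw [pv_sorted_snoc, if_pos rfl, ih]

-- stable forward sort by a key strictly increasing along F = concatenation of fibers in F-order
theorem pv_sorted_mono_flatMap {α K : Type} [DecidableEq K] (fc : α → K) (κF : K → Int) (F : List K)
    (hmono : F.Pairwise (fun a b => κF a < κF b)) :
    ∀ R : List α, (∀ x ∈ R, fc x ∈ F) →
      PySem.List.sorted R (fun x => κF (fc x)) false
        = F.flatMap (fun c => R.filter (fun x => decide (fc x = c))) := by
  intro R
  induction R using List.reverseRecOn with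
  | nil =>
    intro _
    simp [PySem.List.sorted]
  | append_singleton R' x ih =>
    intro hmem
    have hc0 : fc x ∈ F := hmem x (by simp)
    obtain ⟨F1, F2, hFsplit⟩ := List.append_of_mem hc0
    have hm1 : ∀ c ∈ F1, κF c < κF (fc x) := by
      intro c hcF
      have := (List.pairwise_append.mp (hFsplit ▸ hmono)).2.2
      exact this c hcF (fc x) (by simp)
    have hm2 : ∀ c ∈ F2, κF (fc x) < κF c := by
      have := (List.pairwise_cons.mp (List.pairwise_append.mp (hFsplit ▸ hmono)).2.1).1
      exact this
    rw [pv_sorted_snoc]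
    rw [ih (fun z hz => hmem z (by simp [hz]))]
    simp only [Bool.false_eq_true, if_false]
    rw [hFsplit]
    -- L1 = fibers of F1 ++ [fc x], L2 = fibers of F2 over R'
    have hsw : F1 ++ fc x :: F2 = (F1 ++ [fc x]) ++ F2 := by simp
    rw [hsw, List.flatMap_append]
    rw [pv_insertBy_sandwich]
    · -- rhs reshuffle
      rw [List.flatMap_append, List.flatMap_append, List.flatMap_append]
      have hfib1 : ∀ c ∈ F1, (R' ++ [x]).filter (fun y => decide (fc y = c)) = R'.filter (fun y => decide (fc y = c)) := by
        intro c hcF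
        have hne : ¬ (fc x = c) := fun h => absurd (hm1 c hcF) (by rw [h]; exact lt_irrefl _)
        simp [List.filter_append, hne]
      have hfib2 : ∀ c ∈ F2, (R' ++ [x]).filter (fun y => decide (fc y = c)) = R'.filter (fun y => decide (fc y = c)) := by
        intro c hcF
        have hne : ¬ (fc x = c) := fun h => absurd (hm2 c hcF) (by rw [h]; exact lt_irrefl _)
        simp [List.filter_append, hne]
      have h1 : List.flatMap (fun c => (R' ++ [x]).filter (fun y => decide (fc y = c))) F1
          = List.flatMap (fun c => R'.filter (fun y => decide (fc y = c))) F1 :=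
        List.flatMap_congr (by intro c hc; exact hfib1 c hc)
      have h2 : List.flatMap (fun c => (R' ++ [x]).filter (fun y => decide (fc y = c))) F2
          = List.flatMap (fun c => R'.filter (fun y => decide (fc y = c))) F2 :=
        List.flatMap_congr (by intro c hc; exact hfib2 c hc)
      have h0 : List.flatMap (fun c => (R' ++ [x]).filter (fun y => decide (fc y = c))) [fc x]
          = R'.filter (fun y => decide (fc y = fc x)) ++ [x] := by
        simp [List.filter_append]
      rw [h1, h2, h0]
      simp
    · -- all of L1 has key ≤ key x : before = false
      intro y hy
      simp only [List.flatMap_append, List.mem_append] at hy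
      rcases hy with hy | hy
      · rcases List.mem_flatMap.mp hy with ⟨c, hcF, hyf⟩
        have : fc y = c := by simpa using (List.mem_filter.mp hyf).2
        have hlt := hm1 c hcF
        simp only [decide_eq_false_iff_not, not_lt]
        rw [this]
        exact le_of_lt hlt
      · rcases List.mem_flatMap.mp hy with ⟨c, hcF, hyf⟩
        have hc : c = fc x := by simpa using hcF
        have : fc y = c := by simpa using (List.mem_filter.mp hyf).2
        simp [this, hc]
    · -- all of L2 has key > key x : before = true
      intro y hy
      rcases List.mem_flatMap.mp hy with ⟨c, hcF, hyf⟩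
      have : fc y = c := by simpa using (List.mem_filter.mp hyf).2
      simp only [decide_eq_true_eq, this]
      exact hm2 c hcF

theorem pv_join_cons_ne_nil (sep a : List Char) (L : List (List Char)) (h : L ≠ []) :
    PySem.Chars.join sep (a :: L) = a ++ sep ++ PySem.Chars.join sep L := by
  cases L with
  | nil => exact absurd rfl h
  | cons q rest => exact PySem.Chars.join_cons_cons sep a q rest

theorem pv_join_snoc (sep : List Char) (A : List (List Char)) (u : List Char) :
    PySem.Chars.join sep (A ++ [u])
      = PySem.Chars.join sep A ++ (if A = [] then [] else sep) ++ u := by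
  induction A with
  | nil => simp [PySem.Chars.join_singleton]
  | cons a A' ih =>
    rw [List.cons_append, pv_join_cons_ne_nil sep a (A' ++ [u]) (by simp)]
    cases A' with
    | nil => simp [PySem.Chars.join_singleton]
    | cons b B =>
      rw [ih]
      rw [pv_join_cons_ne_nil sep a (b :: B) (by simp)]
      simp

theorem pv_join_go (sep : List Char) :
    ∀ (fuel : Nat) (l cur : List Char) (acc : List (List Char)),
      PySem.Chars.join sep (PySem.Chars.splitOn.go sep fuel l cur acc)
        = PySem.Chars.join sep acc.reverse ++ (if acc = [] then [] else sep) ++ cur.reverse ++ l := by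
  intro fuel
  induction fuel with
  | zero =>
    intro l cur acc
    rw [show PySem.Chars.splitOn.go sep 0 l cur acc = ((cur.reverse ++ l) :: acc).reverse from rfl]
    rw [show ((cur.reverse ++ l) :: acc).reverse = acc.reverse ++ [cur.reverse ++ l] by simp]
    rw [pv_join_snoc]
    simp
  | succ fuel ih =>
    intro l cur acc
    cases l with
    | nil =>
      rw [show PySem.Chars.splitOn.go sep (fuel+1) [] cur acc = (cur.reverse :: acc).reverse from rfl]
      rw [show (cur.reverse :: acc).reverse = acc.reverse ++ [cur.reverse] by simp]
      rw [pv_join_snoc]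
      simp
    | cons c rest =>
      by_cases hpre : sep.isPrefixOf (c :: rest) = true
      · rw [show PySem.Chars.splitOn.go sep (fuel+1) (c :: rest) cur acc
            = PySem.Chars.splitOn.go sep fuel (List.drop sep.length (c :: rest)) [] (cur.reverse :: acc) by
          conv_lhs => rw [PySem.Chars.splitOn.go]
          simp [hpre]]
        rw [ih]
        have hl : (c :: rest) = sep ++ List.drop sep.length (c :: rest) := by
          exact (List.prefix_iff_eq_append.mp (List.isPrefixOf_iff_prefix.mp hpre)).symm
        rw [show (cur.reverse :: acc).reverse = acc.reverse ++ [cur.reverse] by simp]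
        rw [pv_join_snoc]
        conv_rhs => rw [hl]
        simp
      · rw [show PySem.Chars.splitOn.go sep (fuel+1) (c :: rest) cur acc
            = PySem.Chars.splitOn.go sep fuel rest (c :: cur) acc by
          conv_lhs => rw [PySem.Chars.splitOn.go]
          simp [hpre]]
        rw [ih]
        simp

theorem pv_join_splitOn (s sep : List Char) :
    PySem.Chars.join sep (PySem.Chars.splitOn s sep) = s := by
  rw [PySem.Chars.splitOn, pv_join_go]
  simp [PySem.Chars.join_nil]

theorem pv_join_split (s : String) :
    PySem.Str.join " " ((PySem.Str.split? s " ").getD []) = s := by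
  have hmap := PySem.Str.split?_map s " "
  have hch : PySem.Chars.split? s.toList " ".toList = some (PySem.Chars.splitOn s.toList " ".toList) := by
    simp [PySem.Chars.split?]
  rw [hch] at hmap
  cases hsp : PySem.Str.split? s " " with
  | none => rw [hsp] at hmap; simp at hmap
  | some parts =>
    rw [hsp] at hmap
    simp only [Option.map_some, Option.some.injEq] at hmap
    simp only [Option.getD_some]
    apply String.toList_injective
    rw [PySem.Str.toList_join, hmap, pv_join_splitOn]

theorem pv_dedup_snoc {α : Type} [BEq α] [LawfulBEq α] (xs : List α) (x : α) :
    PySem.List.dedup (xs ++ [x])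
      = if x ∈ xs then PySem.List.dedup xs else PySem.List.dedup xs ++ [x] := by
  have h1 : PySem.List.dedup (xs ++ [x]) = PySem.Set.add (PySem.List.dedup xs) x := by
    simp [PySem.List.dedup, PySem.Set.ofList, List.foldl_append]
  rw [h1, PySem.Set.add]
  by_cases hm : x ∈ xs
  · rw [if_pos hm, if_pos]
    simp [PySem.Set.contains, hm]
  · rw [if_neg hm, if_neg]
    simp [PySem.Set.contains, hm]

theorem pv_firstSeen_items {α K : Type} [BEq K] [LawfulBEq K] (fc : α → K) (xs : List α) :
    (xs.foldl (fun d s => d.setdefault (fc s) ((PySem.Dict.size d : Int))) PySem.Dict.empty).items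
      = (PySem.List.dedup (xs.map fc)).zipIdx.map (fun p => (p.1, (p.2 : Int))) := by
  induction xs using List.reverseRecOn with
  | nil => rfl
  | append_singleton xs x ih =>
    rw [List.foldl_append, List.foldl_cons, List.foldl_nil]
    set d := xs.foldl (fun d s => d.setdefault (fc s) ((PySem.Dict.size d : Int))) PySem.Dict.empty with hd
    have hkeys : d.keys = PySem.List.dedup (xs.map fc) := by
      show d.items.map Prod.fst = _
      rw [ih]
      simp [Function.comp_def]
    rw [List.map_append, List.map_singleton, pv_dedup_snoc]
    by_cases hm : fc x ∈ xs.map fc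
    · have hc : d.contains (fc x) = true := by
        rw [PySem.Dict.contains_iff_mem_keys, hkeys, PySem.List.mem_dedup]
        exact hm
      rw [PySem.Dict.setdefault_of_contains d _ hc, if_pos hm, ih]
    · have hc : d.contains (fc x) = false := by
        rw [← Bool.not_eq_true, PySem.Dict.contains_iff_mem_keys, hkeys, PySem.List.mem_dedup]
        exact hm
      rw [PySem.Dict.setdefault, hc]
      simp only [Bool.false_eq_true, if_false, if_neg hm]
      show d.items ++ [(fc x, (PySem.Dict.size d : Int))] = _
      rw [ih, List.zipIdx_append, List.map_append]
      congr 1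
      have hlen : PySem.Dict.size d = (PySem.List.dedup (xs.map fc)).length := by
        show d.items.length = _
        rw [ih]; simp
      simp [hlen]

def pvFc (s : String) : Option Char := PySem.Str.pyGet? s 0
def pvKeyS (s : String) : List String := (PySem.Str.split? s " ").getD []


theorem pv_sorted_instEq {α κ : Type} {L1 L2 : LT κ} (D1 : @DecidableLT κ L1) (D2 : @DecidableLT κ L2)
    (h : L1 = L2) (xs : List α) (key : α → κ) (rev : Bool) :
    @PySem.List.sorted α κ L1 D1 xs key rev = @PySem.List.sorted α κ L2 D2 xs key rev := by
  subst h
  have hD : D1 = D2 := by funext a b; exact Subsingleton.elim _ _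
  rw [hD]

theorem pv_firstSeen_pairwise (index : List String) :
    (PySem.List.dedup (index.map pvFc)).Pairwise (fun a b =>
      (index.foldl (fun d s => d.setdefault (pvFc s) ((PySem.Dict.size d : Int))) PySem.Dict.empty).getD a 0
        < (index.foldl (fun d s => d.setdefault (pvFc s) ((PySem.Dict.size d : Int))) PySem.Dict.empty).getD b 0) := by
  set d := index.foldl (fun d s => d.setdefault (pvFc s) ((PySem.Dict.size d : Int))) PySem.Dict.empty with hd
  set F := PySem.List.dedup (index.map pvFc) with hF
  have hitems : d.items = F.zipIdx.map (fun p => (p.1, (p.2 : Int))) :=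
    pv_firstSeen_items pvFc index
  have hkeys : d.keys = F := by
    show d.items.map Prod.fst = F
    rw [hitems]; simp [Function.comp_def]
  have hnd : d.keys.Nodup := by rw [hkeys]; exact PySem.List.nodup_dedup _
  have hgetD : ∀ (i : Nat) (hi : i < F.length), d.getD F[i] 0 = (i : Int) := by
    intro i hi
    apply PySem.Dict.getD_of_mem_items d _ hnd
    rw [hitems]
    apply List.mem_map.mpr
    refine ⟨(F[i], i), ?_, rfl⟩
    have : (F.zipIdx)[i]'(by simpa using hi) = (F[i], i) := by
      simp [List.getElem_zipIdx]
    rw [← this]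
    exact List.getElem_mem _
  rw [List.pairwise_iff_getElem]
  intro i j hi hj hij
  rw [hgetD i hi, hgetD j hj]
  exact_mod_cast hij

theorem pv_B_eq (index : List String) :
    sort_index_alt index
      = (PySem.List.dedup (index.map pvFc)).flatMap
          (fun c => PySem.List.sorted (index.filter (fun i => decide (pvFc i = c))) pvKeyS true) := by
  show PySem.List.sorted (PySem.List.sorted index pvKeyS true)
      (fun s => (index.foldl (fun d s => d.setdefault (pvFc s) ((PySem.Dict.size d : Int))) PySem.Dict.empty).getD (pvFc s) 0) false = _
  rw [pv_sorted_mono_flatMap pvFc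
        (fun c => (index.foldl (fun d s => d.setdefault (pvFc s) ((PySem.Dict.size d : Int))) PySem.Dict.empty).getD c 0)
        (PySem.List.dedup (index.map pvFc)) (pv_firstSeen_pairwise index)
        (PySem.List.sorted index pvKeyS true)
        (by
          intro x hx
          rw [PySem.List.mem_dedup]
          exact List.mem_map_of_mem ((PySem.List.mem_sorted _ _ _ _).mp hx))]
  rw [pv_sorted_instEq (fun a b => List.decidableLT a b) (@LinearOrder.toDecidableLT (List String) _) rfl index pvKeyS true]
  apply List.flatMap_congr
  intro c _
  rw [pv_sorted_instEq (fun a b => List.decidableLT a b) (@LinearOrder.toDecidableLT (List String) _) rfl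
        (List.filter (fun i => decide (pvFc i = c)) index) pvKeyS true]
  exact pv_filter_sorted_rev pvKeyS (fun x => decide (pvFc x = c)) index

theorem pv_beq_decide {K : Type} [BEq K] [LawfulBEq K] [DecidableEq K] (a c : K) :
    (a == c) = decide (a = c) := by
  by_cases h : a = c
  · simp [h]
  · simp [h]

theorem pv_A_eq (index : List String) :
    sort_index index
      = (PySem.List.dedup (index.map pvFc)).flatMap
          (fun c => PySem.List.sorted (index.filter (fun i => decide (pvFc i = c))) pvKeyS true) := by
  show (PySem.Dict.values (index.foldl (fun d i => d.modify (pvFc i) [] (· ++ [i])) PySem.Dict.empty)).foldl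
      (fun ret_index group =>
        ret_index ++ (PySem.List.sorted (group.map pvKeyS) (fun x => x) true).map (fun t => PySem.Str.join " " t)) [] = _
  set G := index.foldl (fun d i => d.modify (pvFc i) [] (· ++ [i])) PySem.Dict.empty with hG
  have hkeys : G.keys = PySem.List.dedup (index.map pvFc) := by
    rw [hG, PySem.Dict.keys_foldl_modify_key index pvFc [] (fun d i => (· ++ [i])) PySem.Dict.empty]
    rfl
  have hnd : G.keys.Nodup := by
    rw [hG]
    exact PySem.Dict.nodup_keys_foldl_modify_key index pvFc [] (fun d i => (· ++ [i])) PySem.Dict.empty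
      (by simp)
  have hgetD : ∀ c, G.getD c [] = index.filter (fun i => pvFc i == c) := by
    intro c
    have hfold : G = (index.map (fun i => (pvFc i, i))).foldl
        (fun d p => d.modify p.1 [] (fun x => x ++ [p.2])) PySem.Dict.empty := by
      rw [hG, List.foldl_map]
    rw [hfold, PySem.Dict.getD_foldl_modify_append]
    rw [PySem.Dict.getD_empty]
    simp [List.filter_map, Function.comp_def]
  have hvals : PySem.Dict.values G = (PySem.List.dedup (index.map pvFc)).map (fun c => index.filter (fun i => pvFc i == c)) := by
    rw [PySem.Dict.values_eq_map_keys G hnd []]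
    rw [hkeys]
    exact List.map_congr_left (fun c _ => hgetD c)
  rw [hvals]
  rw [PySem.List.foldl_append_eq_flatMap]
  rw [List.nil_append, List.flatMap_map]
  apply List.flatMap_congr
  intro c _
  have hfc : (fun i => pvFc i == c) = (fun i => decide (pvFc i = c)) := by
    funext i; exact pv_beq_decide (pvFc i) c
  rw [hfc]
  rw [pv_sorted_map pvKeyS (index.filter (fun i => decide (pvFc i = c))) (fun x => x) true]
  rw [List.map_map]
  have : (fun t => PySem.Str.join " " t) ∘ pvKeyS = id := by
    funext s; exact pv_join_split s
  rw [this, List.map_id]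

-- ===== VERDICT (by name: the statement is the Claim_ definition above) =====
theorem sort_index_spec : Claim_equal_sort_index := by
  intro index _ _
  unfold Spec_sort_index
  rw [pv_A_eq, pv_B_eq]
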